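-- pv_equiv track=rewrite | github.com/KayTheGuy/weather-predictor | analyze_images.py | count_labels
-- ===== SOURCE A (Python) =====
-- def count_labels(labels):
--     rain_count = 0
--     snow_count = 0
--     clear_count = 0
--     cloudy_count = 0
--
--     for label in labels:
--             if label == 'Clear':
--                 clear_count += 1
--             elif label == 'Cloudy':
--                 cloudy_count += 1
--             elif label == 'Rain':
--                 rain_count += 1
--             elif label == 'Snow':
--                 snow_count += 1
--     return [rain_count, snow_count, clear_count, cloudy_count]
-- ===== SOURCE B (Python) =====
-- def count_labels(labels):
--     # Four staged scans of the input, one per key, via list.count;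
--     # no per-element branching and no accumulator state.
--     return [labels.count(k) for k in ('Rain', 'Snow', 'Clear', 'Cloudy')]
-- ===== Notes on version B (the rewrite author's own statement) =====
-- stated objective: simpler
-- what changed: Replaces the single accumulator pass with a four-branch if/elif chain by four independent staged scans, one list.count per key, with no mutable state or branching.
import Mathlib
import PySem

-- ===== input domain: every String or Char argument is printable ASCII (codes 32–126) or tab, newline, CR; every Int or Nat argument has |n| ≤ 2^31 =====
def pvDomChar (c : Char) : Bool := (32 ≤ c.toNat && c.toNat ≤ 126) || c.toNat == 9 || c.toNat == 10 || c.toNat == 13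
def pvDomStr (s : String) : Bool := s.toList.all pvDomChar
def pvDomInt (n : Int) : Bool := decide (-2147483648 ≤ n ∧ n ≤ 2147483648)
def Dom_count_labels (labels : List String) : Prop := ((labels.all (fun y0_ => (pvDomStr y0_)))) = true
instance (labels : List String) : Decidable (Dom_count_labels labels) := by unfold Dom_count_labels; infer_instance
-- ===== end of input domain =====

-- B replaces the single accumulator pass with its if/elif chain by four independent staged scans (one list.count per key); simpler, same O(n) cost.


-- ===== PORT A =====
def count_labels (labels : List String) : List Int :=
  let st := labels.foldl
    (fun (st : Int × Int × Int × Int) label =>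
      let (rain_count, snow_count, clear_count, cloudy_count) := st
      if label == "Clear" then (rain_count, snow_count, clear_count + 1, cloudy_count)
      else if label == "Cloudy" then (rain_count, snow_count, clear_count, cloudy_count + 1)
      else if label == "Rain" then (rain_count + 1, snow_count, clear_count, cloudy_count)
      else if label == "Snow" then (rain_count, snow_count + 1, clear_count, cloudy_count)
      else (rain_count, snow_count, clear_count, cloudy_count))
    (0, 0, 0, 0)
  [st.1, st.2.1, st.2.2.1, st.2.2.2]

-- ===== PORT B =====
-- the comprehension over the key tuple, one labels.count scan per key
def count_labels_alt (labels : List String) : List Int :=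
  ["Rain", "Snow", "Clear", "Cloudy"].map (fun k => (PySem.List.count labels k : Int))

-- ===== PRECONDITION & SPEC =====
def Spec_count_labels (labels : List String) (out : List Int) : Prop := out = count_labels_alt labels
instance (labels : List String) (out : List Int) : Decidable (Spec_count_labels labels out) := by unfold Spec_count_labels; infer_instance

-- ===== CLAIM (what is proved, stated in full; the proofs are below) =====
def Claim_equal_count_labels : Prop := ∀ (labels : List String), Dom_count_labels labels → Spec_count_labels labels (count_labels labels)

-- ===== LEMMAS AND PROOFS =====

-- A's fold, from any start state, adds the count of each of the four labels to its component.
theorem count_labels_foldl (labels : List String) (r s c cl : Int) :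
    labels.foldl
      (fun (st : Int × Int × Int × Int) label =>
        let (rain_count, snow_count, clear_count, cloudy_count) := st
        if label == "Clear" then (rain_count, snow_count, clear_count + 1, cloudy_count)
        else if label == "Cloudy" then (rain_count, snow_count, clear_count, cloudy_count + 1)
        else if label == "Rain" then (rain_count + 1, snow_count, clear_count, cloudy_count)
        else if label == "Snow" then (rain_count, snow_count + 1, clear_count, cloudy_count)
        else (rain_count, snow_count, clear_count, cloudy_count))
      (r, s, c, cl)
    = (r + labels.count "Rain", s + labels.count "Snow",
       c + labels.count "Clear", cl + labels.count "Cloudy") := by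
  induction labels generalizing r s c cl with
  | nil => simp
  | cons x xs ih =>
    simp only [List.foldl_cons, List.count_cons]
    by_cases h1 : x = "Clear" <;> by_cases h2 : x = "Cloudy" <;>
      by_cases h3 : x = "Rain" <;> by_cases h4 : x = "Snow" <;>
      simp_all [ih] <;> ring_nf <;> simp [add_comm, add_assoc, add_left_comm]

-- ===== VERDICT (by name: the statement is the Claim_ definition above) =====
theorem count_labels_spec : Claim_equal_count_labels := by
  intro labels _
  show count_labels labels = count_labels_alt labels
  unfold count_labels count_labels_alt
  rw [count_labels_foldl]
  simp [PySem.List.count_eq]
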